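-- pv_equiv track=rewrite | github.com/lyj157175/Notes | 左程云/第一章：栈和队列/3.py | get_and_remove_last
-- ===== SOURCE A (Python) =====
-- def get_and_remove_last(stack):
--     result = stack.pop()
--     if len(stack)==0:
--         return result
--     else:
--         last = get_and_remove_last(stack)
--         stack.append(result)
--         return last
-- ===== SOURCE B (Python) =====
-- def get_and_remove_last(stack):
--     temp = [stack.pop()]          # IndexError on empty, same as A
--     while stack:
--         temp.append(stack.pop())
--     for x in reversed(temp[:-1]):
--         stack.append(x)
--     return temp[-1]
-- ===== Notes on version B (the rewrite author's own statement) =====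
-- stated objective: simpler
-- what changed: Replaced A's recursive drill-to-the-bottom (recursion depth = stack size) with an iterative pop-all-into-a-temp-list loop that returns the last popped element and pushes the rest back in order.
import Mathlib
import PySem

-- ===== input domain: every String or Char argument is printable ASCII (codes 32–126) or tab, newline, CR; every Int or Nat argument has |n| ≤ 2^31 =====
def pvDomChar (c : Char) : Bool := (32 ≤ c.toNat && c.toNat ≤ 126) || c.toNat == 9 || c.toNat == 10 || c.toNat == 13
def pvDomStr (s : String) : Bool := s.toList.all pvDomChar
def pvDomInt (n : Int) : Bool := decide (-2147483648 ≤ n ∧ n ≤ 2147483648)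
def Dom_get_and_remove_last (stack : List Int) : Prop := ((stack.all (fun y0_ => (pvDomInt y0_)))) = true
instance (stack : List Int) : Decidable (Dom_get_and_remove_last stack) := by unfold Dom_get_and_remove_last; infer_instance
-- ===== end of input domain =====

-- B replaces A's recursive drill-to-the-bottom with an iterative pop-all loop (simpler decomposition);
-- A and B mutate the Python stack identically, and the equivalence proved here is about the return value.


-- ===== PORT A =====
-- result = stack.pop(); if the rest is empty return result, else recurse and push result back.
-- The push-back mutation has no effect on the returned value; the empty case (IndexError) is outside Pre_.
def get_and_remove_last (stack : List Int) : Int :=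
  if h : stack = [] then 0   -- Python raises IndexError here; excluded by Pre_
  else
    let result := stack.getLast h
    let rest := stack.dropLast
    if rest = [] then result
    else get_and_remove_last rest
termination_by stack.length
decreasing_by
  simp [List.length_dropLast]
  exact List.length_pos_iff.mpr h

-- ===== PORT B =====
-- while stack: temp.append(stack.pop())
def pvPopAll (stack temp : List Int) : List Int :=
  if h : stack = [] then temp
  else pvPopAll stack.dropLast (temp ++ [stack.getLast h])
termination_by stack.length
decreasing_by
  simp [List.length_dropLast]
  exact List.length_pos_iff.mpr h

-- temp = [stack.pop()]; while stack: temp.append(stack.pop()); (push-back loop mutates only); return temp[-1]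
def get_and_remove_last_alt (stack : List Int) : Int :=
  if h : stack = [] then 0   -- Python raises IndexError here; excluded by Pre_
  else
    let temp := pvPopAll stack.dropLast [stack.getLast h]
    (PySem.List.pyGet? temp (-1)).getD 0

-- ===== PRECONDITION & SPEC =====
-- Pre_ excludes the empty stack, on which both A and B raise IndexError via stack.pop().
def Pre_get_and_remove_last (stack : List Int) : Prop := stack ≠ []
instance (stack : List Int) : Decidable (Pre_get_and_remove_last stack) := by unfold Pre_get_and_remove_last; infer_instance
def pvWitness_get_and_remove_last : List Int := [1, 2, 3]

def Spec_get_and_remove_last (stack : List Int) (out : Int) : Prop := out = get_and_remove_last_alt stack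
instance (stack : List Int) (out : Int) : Decidable (Spec_get_and_remove_last stack out) := by unfold Spec_get_and_remove_last; infer_instance

-- ===== CLAIM (what is proved, stated in full; the proofs are below) =====
def Claim_equal_get_and_remove_last : Prop := ∀ (stack : List Int), Dom_get_and_remove_last stack → Pre_get_and_remove_last stack → Spec_get_and_remove_last stack (get_and_remove_last stack)

-- ===== LEMMAS AND PROOFS =====

-- A returns the bottom (head) element.
theorem getA_eq_head (x : Int) (xs : List Int) : get_and_remove_last (x :: xs) = x := by
  induction xs using List.reverseRecOn with
  | nil => simp [get_and_remove_last]
  | append_singleton ys y ih =>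
      have hd : (x :: (ys ++ [y])).dropLast = x :: ys := by
        rw [← List.cons_append, List.dropLast_concat]
      rw [get_and_remove_last, hd]
      simp [ih]

theorem pvPopAll_eq (stack : List Int) (temp : List Int) :
    pvPopAll stack temp = temp ++ stack.reverse := by
  induction stack using List.reverseRecOn generalizing temp with
  | nil => rw [pvPopAll]; simp
  | append_singleton ys y ih =>
      rw [pvPopAll]
      simp [List.dropLast_concat, ih]

theorem getAlt_eq_head (x : Int) (xs : List Int) : get_and_remove_last_alt (x :: xs) = x := by
  rw [get_and_remove_last_alt]
  simp only [reduceDIte, reduceCtorEq]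
  rw [pvPopAll_eq]
  rcases List.eq_nil_or_concat xs with rfl | ⟨ys, y, rfl⟩
  · simp [PySem.List.pyGet?, PySem.List.pyIdx?]
  · have hd : (x :: (ys ++ [y])).dropLast = x :: ys := by
      rw [← List.cons_append, List.dropLast_concat]
    simp only [List.concat_eq_append, hd]
    simp [PySem.List.pyGet?, PySem.List.pyIdx?]

-- ===== VERDICT (by name: the statement is the Claim_ definition above) =====
theorem get_and_remove_last_spec : Claim_equal_get_and_remove_last := by
  intro stack _ hpre
  rcases stack with _ | ⟨x, xs⟩
  · exact absurd rfl hpre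
  · show get_and_remove_last (x :: xs) = get_and_remove_last_alt (x :: xs)
    rw [getA_eq_head, getAlt_eq_head]
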